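-- pv_equiv track=rewrite | github.com/MateoAngulo/Ensamblador | RiscV/main.py | instruction_J
-- ===== SOURCE A (Python) =====
-- def instruction_J(isNeg,label,rd,opcode):
--     instruction=[]
--     cont=0
--     while cont < 7:
--         instruction.append(opcode[-1])
--         opcode=opcode[:-1]
--         cont+=1
--     while cont < 12:
--         if(not rd): #si esta vacio
--             instruction.append('0')
--         elif(rd[-1]=='b'):
--             instruction.append('0')
--         else:
--             instruction.append(rd[-1])
--         rd=rd[:-1]
--         cont+=1
--     label=label[:-1]
--     'Crea copias para manejar los bits dispersos del offset'
--     label_copy1=label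
--     label_copy2=label
--     label_copy3=label
--     'Bits 10:1 del offset:'
--     for i in range(11):
--         label=label[:-1]
--
--     while cont < 20:
--         if (not label):
--             if isNeg:
--                 instruction.append('1')
--             else:
--                 instruction.append('0')
--         elif(label[-1]=='b'):
--             if isNeg:
--                 instruction.append('1')
--             else:
--                 instruction.append('0')
--         else:
--             instruction.append(label[-1])
--         label=label[:-1]
--         cont+=1
--     'Bit 11 del offset:'
--     for i in range(10):
--         label_copy1=label_copy1[:-1]
--     if (not label_copy1):
--         if isNeg:
--             instruction.append('1')
--         else:
--             instruction.append('0')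
--     elif(label_copy1[-1]=='b'):
--         if isNeg:
--             instruction.append('1')
--         else:
--             instruction.append('0')
--     else:
--         instruction.append(label_copy1[-1])
--     cont+=1
--     'Bits 19:12 del offset:'
--     while cont < 31:
--         if (not label_copy2):
--             if isNeg:
--                 instruction.append('1')
--             else:
--                 instruction.append('0')
--         elif(label_copy2[-1]=='b'):
--             if isNeg:
--                 instruction.append('1')
--             else:
--                 instruction.append('0')
--         else:
--             instruction.append(label_copy2[-1])
--         label_copy2=label_copy2[:-1]
--         cont+=1
--
--     for i in range(19):
--         label_copy3=label_copy3[:-1]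
--
--     if (not label_copy3):
--         if isNeg:
--             instruction.append('1')
--         else:
--             instruction.append('0')
--     elif(label_copy3[-1]=='b'):
--         if isNeg:
--             instruction.append('1')
--         else:
--             instruction.append('0')
--     else:
--         instruction.append(label_copy3[-1])
--     return instruction
-- ===== SOURCE B (Python) =====
-- def instruction_J(isNeg, label, rd, opcode):
--     sign = '1' if isNeg else '0'
--
--     def bit(s, k, fb):
--         if k >= len(s) or s[len(s) - 1 - k] == 'b':
--             return fb
--         return s[len(s) - 1 - k]
--
--     off = label[:-1]
--     out = [opcode[len(opcode) - 1 - k] for k in range(7)]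
--     out += [bit(rd, k, '0') for k in range(5)]
--     out += [bit(off, 11 + k, sign) for k in range(8)]
--     out.append(bit(off, 10, sign))
--     out += [bit(off, k, sign) for k in range(10)]
--     out.append(bit(off, 19, sign))
--     return out
-- ===== Notes on version B (the rewrite author's own statement) =====
-- stated objective: simpler
-- what changed: Replaces A's destructive while-loops that repeatedly slice/copy the strings (and three label copies for the scattered offset bits) with a single bit(s,k,fallback) helper and direct index maps from each output position to its source character.
import Mathlib
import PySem

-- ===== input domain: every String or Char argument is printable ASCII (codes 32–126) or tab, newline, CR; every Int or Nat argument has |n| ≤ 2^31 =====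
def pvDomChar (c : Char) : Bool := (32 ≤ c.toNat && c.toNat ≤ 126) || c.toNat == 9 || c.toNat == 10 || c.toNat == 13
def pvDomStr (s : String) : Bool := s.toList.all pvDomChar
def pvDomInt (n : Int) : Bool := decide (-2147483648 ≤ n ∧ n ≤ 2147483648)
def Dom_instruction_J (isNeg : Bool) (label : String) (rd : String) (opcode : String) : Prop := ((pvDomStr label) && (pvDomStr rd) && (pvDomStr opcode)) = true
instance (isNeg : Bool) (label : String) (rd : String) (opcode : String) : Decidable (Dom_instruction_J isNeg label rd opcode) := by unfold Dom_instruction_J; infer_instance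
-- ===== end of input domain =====

-- B replaces A's destructive slice-and-copy while-loops with one bit(s,k,fallback) helper
-- and direct index maps from each output position to its source character (objective: simpler).

-- ===== PORT A =====
-- Python s[:-1] on a string = List.dropLast on its chars (exact, also for the empty string);
-- s[-1] = getLast? (none = IndexError, excluded by Pre_ for opcode; guarded by the branches elsewhere).

-- the appended element of the opcode loop: opcode[-1]  (IndexError → "" placeholder, excluded by Pre_)
def jOpStep (op : List Char) : String :=
  (op.getLast?.map (fun c => String.ofList [c])).getD ""

-- the appended element of the rd loop: '0' if rd empty, '0' if rd[-1]=='b', else rd[-1]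
def jRdStep (rd : List Char) : String :=
  match rd.getLast? with
  | none => "0"
  | some c => if c = 'b' then "0" else String.ofList [c]

-- the shared body of the three label branches: sign bit if empty or 'b', else label[-1]
def jLabStep (isNeg : Bool) (lab : List Char) : String :=
  match lab.getLast? with
  | none => if isNeg then "1" else "0"
  | some c => if c = 'b' then (if isNeg then "1" else "0") else String.ofList [c]

-- while cont < 7: append opcode[-1]; opcode = opcode[:-1]
def jLoopOp (cont : Nat) (opcode : List Char) (ins : List String) : List Char × List String :=
  if cont < 7 then jLoopOp (cont + 1) opcode.dropLast (ins ++ [jOpStep opcode])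
  else (opcode, ins)
termination_by 7 - cont

-- while cont < 12: append the rd bit; rd = rd[:-1]
def jLoopRd (cont : Nat) (rd : List Char) (ins : List String) : List Char × List String :=
  if cont < 12 then jLoopRd (cont + 1) rd.dropLast (ins ++ [jRdStep rd])
  else (rd, ins)
termination_by 12 - cont

-- while cont < 20 over label (already truncated by 11)
def jLoop20 (isNeg : Bool) (cont : Nat) (lab : List Char) (ins : List String) : List Char × List String :=
  if cont < 20 then jLoop20 isNeg (cont + 1) lab.dropLast (ins ++ [jLabStep isNeg lab])
  else (lab, ins)
termination_by 20 - cont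

-- while cont < 31 over label_copy2
def jLoop31 (isNeg : Bool) (cont : Nat) (lab : List Char) (ins : List String) : List Char × List String :=
  if cont < 31 then jLoop31 isNeg (cont + 1) lab.dropLast (ins ++ [jLabStep isNeg lab])
  else (lab, ins)
termination_by 31 - cont

-- for i in range(n): s = s[:-1]
def jDropN (n : Nat) (s : List Char) : List Char :=
  match n with
  | 0 => s
  | n + 1 => jDropN n s.dropLast

def instruction_J (isNeg : Bool) (label : String) (rd : String) (opcode : String) : List String :=
  let (_, ins1) := jLoopOp 0 opcode.toList []
  let (_, ins2) := jLoopRd 7 rd.toList ins1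
  let lab := label.toList.dropLast          -- label = label[:-1]
  let labCopy1 := lab
  let labCopy2 := lab
  let labCopy3 := lab
  let lab' := jDropN 11 lab                 -- 'Bits 10:1' truncation
  let (_, ins3) := jLoop20 isNeg 12 lab' ins2
  let labCopy1' := jDropN 10 labCopy1       -- 'Bit 11'
  let ins4 := ins3 ++ [jLabStep isNeg labCopy1']
  let (_, ins5) := jLoop31 isNeg 21 labCopy2 ins4   -- 'Bits 19:12'
  let labCopy3' := jDropN 19 labCopy3
  ins5 ++ [jLabStep isNeg labCopy3']

-- ===== PORT B =====
-- bit(s, k, fb): fb when k >= len(s) or the char is 'b', else s[len(s)-1-k]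
def jBit (s : List Char) (k : Nat) (fb : String) : String :=
  if h : k < s.length then
    if s[s.length - 1 - k] = 'b' then fb else String.ofList [s[s.length - 1 - k]]
  else fb

def instruction_J_alt (isNeg : Bool) (label : String) (rd : String) (opcode : String) : List String :=
  let sign := if isNeg then "1" else "0"
  let op := opcode.toList
  let off := label.toList.dropLast
  -- [opcode[len(opcode)-1-k] for k in range(7)]  (pyGet? none = Python IndexError, excluded by Pre_)
  let out := (List.range 7).map (fun k =>
    ((PySem.List.pyGet? op ((op.length : Int) - 1 - (k : Int))).map (fun c => String.ofList [c])).getD "")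
  let out := out ++ (List.range 5).map (fun k => jBit rd.toList k "0")
  let out := out ++ (List.range 8).map (fun k => jBit off (11 + k) sign)
  let out := out ++ [jBit off 10 sign]
  let out := out ++ (List.range 10).map (fun k => jBit off k sign)
  out ++ [jBit off 19 sign]

-- ===== PRECONDITION & SPEC =====
-- Pre_ excludes opcode strings shorter than 7 characters, on which A raises IndexError (opcode[-1] on an emptied string).
def Pre_instruction_J (isNeg : Bool) (label : String) (rd : String) (opcode : String) : Prop :=
  7 ≤ opcode.toList.length
instance (isNeg : Bool) (label : String) (rd : String) (opcode : String) : Decidable (Pre_instruction_J isNeg label rd opcode) := by unfold Pre_instruction_J; infer_instance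

def pvWitness_instruction_J : Bool × String × String × String := (false, "1010", "101", "1101111")

def Spec_instruction_J (isNeg : Bool) (label : String) (rd : String) (opcode : String) (out : List String) : Prop := out = instruction_J_alt isNeg label rd opcode
instance (isNeg : Bool) (label : String) (rd : String) (opcode : String) (out : List String) : Decidable (Spec_instruction_J isNeg label rd opcode out) := by unfold Spec_instruction_J; infer_instance

-- ===== CLAIM (what is proved, stated in full; the proofs are below) =====
def Claim_equal_instruction_J : Prop := ∀ (isNeg : Bool) (label : String) (rd : String) (opcode : String), Dom_instruction_J isNeg label rd opcode → Pre_instruction_J isNeg label rd opcode → Spec_instruction_J isNeg label rd opcode (instruction_J isNeg label rd opcode)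

-- ===== LEMMAS AND PROOFS =====

theorem jDropN_length (n : Nat) (s : List Char) : (jDropN n s).length = s.length - n := by
  induction n generalizing s with
  | zero => simp [jDropN]
  | succ n ih => simp [jDropN, ih]; omega

theorem getLast?_jDropN (k : Nat) (s : List Char) :
    (jDropN k s).getLast? = if h : k < s.length then some (s[s.length - 1 - k]'(by omega)) else none := by
  induction k generalizing s with
  | zero =>
    cases s with
    | nil => simp [jDropN]
    | cons a t =>
      simp [jDropN, List.getLast?_eq_getElem?]
      rfl
  | succ k ih =>
    show (jDropN k s.dropLast).getLast? = _
    rw [ih]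
    by_cases h : k + 1 < s.length
    · rw [dif_pos (by simp [List.length_dropLast]; omega), dif_pos h]
      rw [List.getElem_dropLast]
      exact congrArg some (getElem_congr rfl (by simp [List.length_dropLast]; omega)
        (by simp [List.length_dropLast]; omega))
    · rw [dif_neg (by simp [List.length_dropLast]; omega), dif_neg h]

-- dropLast collapsing: keep everything in jDropN form
theorem dropLast_norm (s : List Char) : s.dropLast = jDropN 1 s := rfl

theorem jDropN_add (m n : Nat) (s : List Char) : jDropN m (jDropN n s) = jDropN (m + n) s := by
  induction n generalizing s with
  | zero => rfl
  | succ n ih =>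
    show jDropN m (jDropN n s.dropLast) = jDropN (m + n) s.dropLast
    exact ih s.dropLast

-- step lemmas: each A-side appended element is B's bit() at the matching position
theorem jRdStep_eq (k : Nat) (s : List Char) : jRdStep (jDropN k s) = jBit s k "0" := by
  by_cases h : k < s.length <;> simp [jRdStep, getLast?_jDropN, jBit, h]

theorem jRdStep_eq0 (s : List Char) : jRdStep s = jBit s 0 "0" := jRdStep_eq 0 s

theorem jLabStep_eq (b : Bool) (k : Nat) (s : List Char) :
    jLabStep b (jDropN k s) = jBit s k (if b then "1" else "0") := by
  by_cases h : k < s.length <;> simp [jLabStep, getLast?_jDropN, jBit, h]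

theorem jDropN_getElem (n i : Nat) (s : List Char) (h : i < (jDropN n s).length) :
    (jDropN n s)[i] = s[i]'(by rw [jDropN_length] at h; omega) := by
  induction n generalizing s with
  | zero => rfl
  | succ n ih =>
    show (jDropN n s.dropLast)[i]'_ = _
    rw [ih]
    exact List.getElem_dropLast ..

theorem jBit_jDropN (n k : Nat) (s : List Char) (fb : String) :
    jBit (jDropN n s) k fb = jBit s (n + k) fb := by
  by_cases h : n + k < s.length
  · have hk : k < (jDropN n s).length := by rw [jDropN_length]; omega
    rw [jBit, jBit, dif_pos hk, dif_pos h]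
    have he : (jDropN n s)[(jDropN n s).length - 1 - k]'(by have := jDropN_length n s; omega) =
        s[s.length - 1 - (n + k)]'(by omega) := by
      rw [jDropN_getElem]
      exact getElem_congr rfl (by rw [jDropN_length]; omega) (by have := jDropN_length n s; omega)
    rw [he]
  · have hk : ¬ k < (jDropN n s).length := by rw [jDropN_length]; omega
    rw [jBit, jBit, dif_neg hk, dif_neg h]

theorem jOpStep_eq (k : Nat) (s : List Char) (h : k < s.length) :
    jOpStep (jDropN k s) = String.ofList [s[s.length - 1 - k]'(by omega)] := by
  simp [jOpStep, getLast?_jDropN, h]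

theorem jOpStep_eq0 (s : List Char) (h : 0 < s.length) :
    jOpStep s = String.ofList [s[s.length - 1 - 0]'(by omega)] := jOpStep_eq 0 s h

theorem jOpStep_getE (k : Nat) (s : List Char) (h : k < s.length) :
    jOpStep (jDropN k s) = (Option.map (fun c => String.ofList [c]) s[s.length - 1 - k]?).getD "" := by
  rw [jOpStep_eq k s h, List.getElem?_eq_getElem (by omega)]
  simp

theorem pyOp_eqI (o : String) (i : Int) (h0 : 0 ≤ i) (h : i < (o.length : Int)) :
    (Option.map (fun c => String.ofList [c])
      (PySem.List.pyGet? o.toList ((o.length : Int) - 1 - i))).getD ""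
      = jOpStep (jDropN i.toNat o.toList) := by
  have hl : o.toList.length = o.length := by simp
  rw [jOpStep_eq i.toNat o.toList (by omega)]
  have ht : (((o.length : Int) - 1 - i).toNat) = o.toList.length - 1 - i.toNat := by omega
  rw [PySem.List.pyGet?_of_nonneg o.toList (by omega), ht,
    List.getElem?_eq_getElem (by omega)]
  simp

theorem pyOp_eq0 (o : String) (h : 0 < o.length) :
    (Option.map (fun c => String.ofList [c])
      (PySem.List.pyGet? o.toList ((o.length : Int) - 1))).getD ""
      = jOpStep o.toList := by
  have hl : o.toList.length = o.length := by simp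
  rw [jOpStep_eq0 o.toList (by omega)]
  have ht : (((o.length : Int) - 1).toNat) = o.toList.length - 1 - 0 := by omega
  rw [PySem.List.pyGet?_of_nonneg o.toList (by omega), ht,
    List.getElem?_eq_getElem (by omega)]
  simp

theorem instruction_J_spec : Claim_equal_instruction_J := by
  intro b label rd opcode _ hpre
  unfold Pre_instruction_J at hpre
  have hl : opcode.toList.length = opcode.length := by simp
  have hL : 7 ≤ opcode.length := by omega
  have hN0 : 0 < opcode.length := by omega
  have hN1 : 1 < opcode.length := by omega
  have hN2 : 2 < opcode.length := by omega
  have hN3 : 3 < opcode.length := by omega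
  have hN4 : 4 < opcode.length := by omega
  have hN5 : 5 < opcode.length := by omega
  have hN6 : 6 < opcode.length := by omega
  have i1 : (1 : Int) < (opcode.length : Int) := by omega
  have i2 : (2 : Int) < (opcode.length : Int) := by omega
  have i3 : (3 : Int) < (opcode.length : Int) := by omega
  have i4 : (4 : Int) < (opcode.length : Int) := by omega
  have i5 : (5 : Int) < (opcode.length : Int) := by omega
  have i6 : (6 : Int) < (opcode.length : Int) := by omega
  unfold Spec_instruction_J instruction_J instruction_J_alt
  simp [jLoopOp, jLoopRd, jLoop20, jLoop31, dropLast_norm, jDropN_add, List.range_succ,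
        pyOp_eqI, pyOp_eq0, jOpStep_getE, jRdStep_eq0, jLabStep_eq, jBit_jDropN,
        hN0, hN1, hN2, hN3, hN4, hN5, hN6, i1, i2, i3, i4, i5, i6]
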